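-- pv_equiv track=rewrite | github.com/LG95/Classifcation-tree-based- | build.py | stopping_condition
-- ===== SOURCE A (Python) =====
-- CLASS = 'class'
--
-- def stopping_condition(records, attributes):
-- 	if attributes == []:
-- 		return True
--
-- 	else:
-- 		for record in records:
-- 			if records[0][CLASS] != record[CLASS]:
-- 				return False
--
-- 		return True
-- ===== SOURCE B (Python) =====
-- CLASS = 'class'
--
-- def stopping_condition(records, attributes):
--     if attributes == []:
--         return True
--     labels = sorted(record[CLASS] for record in records)
--     return labels == [] or labels[0] == labels[-1]
-- ===== Notes on version B (the rewrite author's own statement) =====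
-- stated objective: alternative
-- what changed: Replaces the early-exit scan comparing every record's class to records[0]'s with a sort-based check: collect all class labels, sort them, and compare the first and last label of the sorted list (equal extremes of a sorted list means all labels are equal).
-- outside the precondition, e.g. on stopping_condition([{'class': 'a'}, {'class': 'b'}, {}], ['x']): A returns False, B raises KeyError
import Mathlib
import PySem

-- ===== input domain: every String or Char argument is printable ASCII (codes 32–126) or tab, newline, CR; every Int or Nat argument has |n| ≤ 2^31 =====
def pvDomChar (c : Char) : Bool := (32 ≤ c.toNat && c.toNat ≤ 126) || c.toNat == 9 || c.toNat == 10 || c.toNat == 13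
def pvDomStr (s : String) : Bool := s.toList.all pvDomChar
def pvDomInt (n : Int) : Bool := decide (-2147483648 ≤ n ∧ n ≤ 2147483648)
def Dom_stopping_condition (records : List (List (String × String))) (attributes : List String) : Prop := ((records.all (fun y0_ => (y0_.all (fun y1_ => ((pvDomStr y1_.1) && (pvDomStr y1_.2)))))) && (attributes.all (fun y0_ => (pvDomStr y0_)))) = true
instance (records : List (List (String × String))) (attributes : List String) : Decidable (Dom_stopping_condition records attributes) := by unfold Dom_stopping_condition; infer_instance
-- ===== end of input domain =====

-- B is an alternative algorithm: sort the class labels and compare first with last, instead of A's early-exit scan against records[0]; return value only, O(n log n) vs O(n).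

-- ===== PORT A =====
-- records[0]['class'] as computed inside the loop body (an Option: none = IndexError/KeyError, excluded by Pre_)
def pvFirstClass (records : List (List (String × String))) : Option String :=
  (PySem.List.pyGet? records 0).bind (fun r0 => (PySem.Dict.mk r0).get? "class")

-- the 'for record in records' loop with its early 'return False'
def pvALoop (records : List (List (String × String))) : List (List (String × String)) → Bool
  | [] => true
  | r :: rs =>
      if pvFirstClass records != (PySem.Dict.mk r).get? "class" then false
      else pvALoop records rs

def stopping_condition (records : List (List (String × String))) (attributes : List String) : Bool :=
  if attributes = [] then true
  else pvALoop records records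

-- ===== PORT B =====
-- record['class'] ported as get? with default "" only to stay total; Pre_ guarantees the key is present.
def stopping_condition_alt (records : List (List (String × String))) (attributes : List String) : Bool :=
  if attributes = [] then true
  else
    let labels := PySem.List.sorted (records.map (fun r => ((PySem.Dict.mk r).get? "class").getD "")) (fun x => x) false
    if labels = [] then true
    else PySem.List.pyGet? labels 0 == PySem.List.pyGet? labels (-1)

-- ===== PRECONDITION & SPEC =====
-- Pre_ excludes records lacking a 'class' key (when attributes ≠ []): there Python A raises KeyError,
-- or (if a mismatch precedes the missing key) A returns False while B's generator raises KeyError.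
def Pre_stopping_condition (records : List (List (String × String))) (attributes : List String) : Prop :=
  attributes = [] ∨ ∀ r ∈ records, ((PySem.Dict.mk r).get? "class").isSome = true

instance (records : List (List (String × String))) (attributes : List String) : Decidable (Pre_stopping_condition records attributes) := by unfold Pre_stopping_condition; infer_instance

def pvWitness_stopping_condition : (List (List (String × String))) × List String :=
  ([[("class", "a")], [("class", "a")]], ["x"])

def Spec_stopping_condition (records : List (List (String × String))) (attributes : List String) (out : Bool) : Prop := out = stopping_condition_alt records attributes
instance (records : List (List (String × String))) (attributes : List String) (out : Bool) : Decidable (Spec_stopping_condition records attributes out) := by unfold Spec_stopping_condition; infer_instance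

-- ===== CLAIM (what is proved, stated in full; the proofs are below) =====
def Claim_equal_stopping_condition : Prop := ∀ (records : List (List (String × String))) (attributes : List String), Dom_stopping_condition records attributes → Pre_stopping_condition records attributes → Spec_stopping_condition records attributes (stopping_condition records attributes)

-- ===== LEMMAS AND PROOFS =====

-- the early-exit loop is List.all against the fixed first class
theorem pvALoop_eq_all (records l : List (List (String × String))) :
    pvALoop records l = l.all (fun r => pvFirstClass records == (PySem.Dict.mk r).get? "class") := by
  induction l with
  | nil => rfl
  | cons r rs ih =>
      simp only [pvALoop, List.all_cons, ih, bne]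
      cases h : pvFirstClass records == (PySem.Dict.mk r).get? "class" <;> simp

-- every element of a sorted list lies between its head and its last element
theorem pv_sorted_sandwich (ls : List String) (m : String) (t : List String)
    (h : PySem.List.sorted ls (fun x => x) false = m :: t) :
    ∀ y ∈ m :: t, m ≤ y ∧ y ≤ (m :: t).getLast (by simp) := by
  intro y hy
  constructor
  · exact PySem.List.key_head_sorted_le (xs := ls) (key := fun x => x) h y
      ((PySem.List.mem_sorted _ _ _ _).mp (h ▸ hy))
  · rcases List.mem_iff_getElem.mp hy with ⟨p, hp, rfl⟩
    rw [List.getLast_eq_getElem]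
    have hq : (m :: t).length - 1 < (PySem.List.sorted ls (fun x => x) false).length := by
      rw [h]; simp
    have hmono := PySem.List.key_sorted_getElem_mono (xs := ls) (key := fun x => x)
      (p := p) (q := (m :: t).length - 1) (by simp at hp ⊢; omega) hq
    simp only [h] at hmono
    exact hmono

-- head = last of a sorted list ⇔ all listed values are equal to the head
theorem pv_sorted_ends_iff (ls : List String) (m : String) (t : List String)
    (h : PySem.List.sorted ls (fun x => x) false = m :: t) :
    ((m :: t).getLast (by simp) = m) ↔ ∀ x ∈ ls, x = m := by
  constructor
  · intro hlast x hx
    have hxm : x ∈ m :: t := h ▸ (PySem.List.mem_sorted _ _ _ _).mpr hx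
    have := pv_sorted_sandwich ls m t h x hxm
    rw [hlast] at this
    exact le_antisymm this.2 this.1
  · intro hall
    have hmem : (m :: t).getLast (by simp) ∈ PySem.List.sorted ls (fun x => x) false := by
      rw [h]; exact List.getLast_mem _
    exact hall _ ((PySem.List.mem_sorted _ _ _ _).mp hmem)

-- ===== VERDICT (by name: the statement is the Claim_ definition above) =====
theorem stopping_condition_spec : Claim_equal_stopping_condition := by
  intro records attributes _ hpre
  unfold Spec_stopping_condition stopping_condition stopping_condition_alt
  by_cases ha : attributes = []
  · simp [ha]
  · simp only [if_neg ha]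
    rcases hpre with h | hall
    · exact absurd h ha
    cases records with
    | nil => simp [pvALoop, PySem.List.sorted]
    | cons r0 rs =>
        set f : List (String × String) → String := fun r => ((PySem.Dict.mk r).get? "class").getD ""
        have hls : (r0 :: rs).map f ≠ [] := by simp
        obtain ⟨m, t, hmt⟩ : ∃ m t, PySem.List.sorted ((r0 :: rs).map f) (fun x => x) false = m :: t := by
          rcases hsp : PySem.List.sorted ((r0 :: rs).map f) (fun x => x) false with _ | ⟨m, t⟩
          · exact absurd ((PySem.List.sorted_eq_nil_iff _ _ _).mp hsp) hls
          · exact ⟨m, t, rfl⟩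
        simp only [hmt, if_neg (by simp : (m :: t) ≠ [])]
        have hget0 : PySem.List.pyGet? (m :: t) 0 = some m := by
          simp [PySem.List.pyGet?, PySem.List.pyIdx?]
        have hgetlast : PySem.List.pyGet? (m :: t) (-1) = some ((m :: t).getLast (by simp)) := by
          simp [PySem.List.pyGet?, PySem.List.pyIdx?, List.getLast_eq_getElem]
          rfl
        have hfc : pvFirstClass (r0 :: rs) = (PySem.Dict.mk r0).get? "class" := by
          simp [pvFirstClass, PySem.List.pyGet?, PySem.List.pyIdx?]
        have hsome : ∀ r ∈ r0 :: rs, (PySem.Dict.mk r).get? "class" = some (f r) := by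
          intro r hr
          rcases Option.isSome_iff_exists.mp (hall r hr) with ⟨v, hv⟩
          simp [f, hv]
        rw [pvALoop_eq_all, hget0, hgetlast, Bool.eq_iff_iff]
        simp only [List.all_eq_true, beq_iff_eq, Option.some.injEq, hfc]
        conv_rhs => rw [eq_comm]
        rw [pv_sorted_ends_iff _ _ _ hmt]
        constructor
        · intro h x hx
          rcases List.mem_map.mp hx with ⟨r, hr, rfl⟩
          have := h r hr
          rw [hsome r0 (by simp), hsome r hr] at this
          have hfr : f r = f r0 := by injection this.symm
          have hm : f r0 = m := by
            have hmem : f r0 ∈ m :: t := hmt ▸ (PySem.List.mem_sorted _ _ _ _).mpr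
              (List.mem_map.mpr ⟨r0, by simp, rfl⟩)
            have h0 : f r0 ≤ f r0 := le_refl _
            -- every element of ls equals f r0, so head m (a member of ls) equals f r0
            have hmls : m ∈ (r0 :: rs).map f := (PySem.List.mem_sorted _ _ _ _).mp (hmt ▸ List.mem_cons_self ..)
            rcases List.mem_map.mp hmls with ⟨r', hr', hr'e⟩
            have := h r' hr'
            rw [hsome r0 (by simp), hsome r' hr'] at this
            have : f r' = f r0 := by injection this.symm
            rw [← hr'e, this]
          rw [hfr, hm]
        · intro h r hr
          rw [hsome r0 (by simp), hsome r hr]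
          have h0 : f r0 = m := h _ (List.mem_map.mpr ⟨r0, by simp, rfl⟩)
          have hr' : f r = m := h _ (List.mem_map.mpr ⟨r, hr, rfl⟩)
          rw [h0, hr']
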